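-- pv_equiv track=rewrite | github.com/EvgeniiDorofeev/stepik_2 | 7.py | translate_to_robber_lang
-- ===== SOURCE A (Python) =====
-- def translate_to_robber_lang(s):
--     a=['a','e', 'i', 'o', 'u']
--     k=[]
--
--     for y in s:
--         for j in a:
--             if y==' ' or y=='!':
--                 k.append(y)
--                 break
--             elif y.lower() in a:
--                 k.append(y)
--                 break
--             else:
--                 if y is not a:
--                     k.append(y+'o'+y)
--                 break
--         continue
--     return ''.join(k)
-- ===== SOURCE B (Python) =====
-- import re
--
-- _PAT = re.compile(r'[^aeiouAEIOU !]')
--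
-- def translate_to_robber_lang(s):
--     return _PAT.sub(lambda m: m.group(0) + 'o' + m.group(0), s)
-- ===== Notes on version B (the rewrite author's own statement) =====
-- stated objective: idiomatic
-- what changed: Replaces the explicit per-character loop with its pointless inner for/break over the vowel list by a single compiled regex substitution that doubles every non-vowel, non-space, non-'!' character in one re.sub call.
import Mathlib
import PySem

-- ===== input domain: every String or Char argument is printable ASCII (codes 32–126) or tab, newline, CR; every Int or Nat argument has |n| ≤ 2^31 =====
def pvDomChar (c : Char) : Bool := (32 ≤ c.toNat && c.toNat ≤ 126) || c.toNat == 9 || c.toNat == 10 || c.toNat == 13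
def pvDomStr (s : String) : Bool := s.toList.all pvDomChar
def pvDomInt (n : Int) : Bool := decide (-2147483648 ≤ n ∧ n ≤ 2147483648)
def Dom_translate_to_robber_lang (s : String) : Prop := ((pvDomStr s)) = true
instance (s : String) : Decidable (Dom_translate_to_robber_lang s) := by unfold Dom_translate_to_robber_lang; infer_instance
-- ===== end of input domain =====

-- B replaces A's per-character loop (with its vacuous inner for/break over the vowel
-- list) by a single regex substitution doubling every non-vowel, non-space, non-'!'
-- character; objective: idiomatic.

-- ===== PORT A =====
-- a = ['a','e','i','o','u']
def pvVowels : List Char := ['a', 'e', 'i', 'o', 'u']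

-- the inner 'for j in a:' loop: every branch ends in 'break', so it acts on the first
-- element of the list only (and does nothing on an empty list); 'y is not a' compares a
-- 1-char string with a list and is always True.
def pvInnerA (y : Char) (k : List String) : List Char → List String
  | [] => k
  | _ :: _ =>
    if y = ' ' ∨ y = '!' then k ++ [String.ofList [y]]
    else if PySem.Chars.lowerChar y ∈ pvVowels then k ++ [String.ofList [y]]
    else k ++ [String.ofList [y, 'o', y]]

def translate_to_robber_lang (s : String) : String :=
  PySem.Str.join "" (s.toList.foldl (fun k y => pvInnerA y k pvVowels) [])

-- ===== PORT B =====
-- hand port of the compiled regex r'[^aeiouAEIOU !]' (a single-character class: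
-- matches c iff c is outside the listed set — exact, char by char)
def pvClassB (c : Char) : Bool :=
  !(c ∈ ['a', 'e', 'i', 'o', 'u', 'A', 'E', 'I', 'O', 'U', ' ', '!'])

-- re.sub with a per-character pattern replaces each matching character by m+'o'+m and
-- keeps the rest: one left-to-right pass
def translate_to_robber_lang_alt (s : String) : String :=
  String.ofList (s.toList.flatMap fun c => if pvClassB c then [c, 'o', c] else [c])

-- ===== PRECONDITION & SPEC =====
def Spec_translate_to_robber_lang (s : String) (out : String) : Prop := out = translate_to_robber_lang_alt s
instance (s : String) (out : String) : Decidable (Spec_translate_to_robber_lang s out) := by unfold Spec_translate_to_robber_lang; infer_instance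

-- ===== CLAIM (what is proved, stated in full; the proofs are below) =====
def Claim_equal_translate_to_robber_lang : Prop := ∀ (s : String), Dom_translate_to_robber_lang s → Spec_translate_to_robber_lang s (translate_to_robber_lang s)

-- ===== LEMMAS AND PROOFS =====

-- the per-character piece A appends for character y
def pvPieceA (y : Char) : List Char :=
  if y = ' ' ∨ y = '!' then [y]
  else if PySem.Chars.lowerChar y ∈ pvVowels then [y]
  else [y, 'o', y]

lemma pvInnerA_eq (y : Char) (k : List String) :
    pvInnerA y k pvVowels = k ++ [String.ofList (pvPieceA y)] := by
  simp only [pvVowels, pvInnerA, pvPieceA]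
  split_ifs <;> rfl

lemma pvFoldA (l : List Char) (k : List String) :
    l.foldl (fun k y => pvInnerA y k pvVowels) k
      = k ++ l.map (fun y => String.ofList (pvPieceA y)) := by
  induction l generalizing k with
  | nil => simp
  | cons h t ih => rw [List.foldl_cons, pvInnerA_eq, ih, List.append_assoc]; rfl

lemma pvJoinNil (cs : List (List Char)) : PySem.Chars.join [] cs = cs.flatten := by
  simp [PySem.Chars.join, List.intercalate]
  induction cs with
  | nil => rfl
  | cons h t ih => cases t <;> simp_all [List.intersperse]

-- on characters of Dom (printable ASCII / tab / newline / CR) the two per-character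
-- pieces coincide
lemma pvPiece_eq (y : Char) (hy : pvDomChar y = true) :
    pvPieceA y = (if pvClassB y then [y, 'o', y] else [y]) := by
  have hb : (32 ≤ y.toNat ∧ y.toNat ≤ 126) ∨ y.toNat = 9 ∨ y.toNat = 10 ∨ y.toNat = 13 := by
    have := hy; simp only [pvDomChar, Bool.or_eq_true, Bool.and_eq_true,
      decide_eq_true_eq, beq_iff_eq] at this
    tauto
  rw [← Char.ofNat_toNat y]
  generalize y.toNat = n at hb ⊢
  rcases hb with ⟨h1, h2⟩ | h | h | h
  · interval_cases n <;> decide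
  all_goals subst h; decide

lemma pvMain (l : List Char) (h : ∀ y ∈ l, pvDomChar y = true) :
    (l.map (fun y => pvPieceA y)).flatten
      = l.flatMap (fun c => if pvClassB c then [c, 'o', c] else [c]) := by
  induction l with
  | nil => rfl
  | cons a t ih =>
    simp only [List.map_cons, List.flatten_cons, List.flatMap_cons,
      ih (fun y hy => h y (List.mem_cons_of_mem _ hy)),
      pvPiece_eq a (h a List.mem_cons_self)]

-- ===== VERDICT (by name: the statement is the Claim_ definition above) =====
theorem translate_to_robber_lang_spec : Claim_equal_translate_to_robber_lang := by
  intro s hDom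
  unfold Spec_translate_to_robber_lang translate_to_robber_lang translate_to_robber_lang_alt
  apply String.toList_inj.mp
  rw [PySem.Str.toList_join, pvFoldA]
  simp only [List.nil_append, List.map_map, Function.comp_def, String.toList_ofList]
  have hchars : ∀ y ∈ s.toList, pvDomChar y = true := by
    simpa [Dom_translate_to_robber_lang, pvDomStr, List.all_eq_true] using hDom
  rw [show ("" : String).toList = [] from rfl, pvJoinNil]
  exact pvMain s.toList hchars
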